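-- pv_equiv track=rewrite | github.com/BohdanSh/RoboticsBSH | mirana_and_arrows.py | max_arrows
-- ===== SOURCE A (Python) =====
-- def max_arrows(N, K, A):
--     A.sort()
--     current_sum = 0
--     max_arrows = 0
--     for distance in A:
--         current_sum += distance
--         if current_sum > K:
--             current_sum -= distance
--             continue
--         max_arrows += 1
--     return max_arrows
-- ===== SOURCE B (Python) =====
-- def max_arrows(N, K, A):
--     A.sort()
--
--     def run(lst, s):
--         # length of the longest prefix of lst whose cumulative sums,
--         # started from offset s, all stay <= K (divide and conquer)
--         if not lst:
--             return 0
--         if len(lst) == 1: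
--             return 1 if s + lst[0] <= K else 0
--         mid = len(lst) // 2
--         left, right = lst[:mid], lst[mid:]
--         r = run(left, s)
--         if r < mid:
--             return r
--         return mid + run(right, s + sum(left))
--
--     return run(A, 0)
-- ===== Notes on version B (the rewrite author's own statement) =====
-- stated objective: alternative
-- what changed: Replaces A's single linear greedy scan with a running skip-accumulator by a divide-and-conquer recursion: split the sorted list in half, recursively compute the within-budget run of the left half, and only if the whole left half fits recurse into the right half with the left's total as offset; correct because on a sorted list A's answer is exactly the leading run of prefix sums staying within K, and that run composes across a split.
import Mathlib
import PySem

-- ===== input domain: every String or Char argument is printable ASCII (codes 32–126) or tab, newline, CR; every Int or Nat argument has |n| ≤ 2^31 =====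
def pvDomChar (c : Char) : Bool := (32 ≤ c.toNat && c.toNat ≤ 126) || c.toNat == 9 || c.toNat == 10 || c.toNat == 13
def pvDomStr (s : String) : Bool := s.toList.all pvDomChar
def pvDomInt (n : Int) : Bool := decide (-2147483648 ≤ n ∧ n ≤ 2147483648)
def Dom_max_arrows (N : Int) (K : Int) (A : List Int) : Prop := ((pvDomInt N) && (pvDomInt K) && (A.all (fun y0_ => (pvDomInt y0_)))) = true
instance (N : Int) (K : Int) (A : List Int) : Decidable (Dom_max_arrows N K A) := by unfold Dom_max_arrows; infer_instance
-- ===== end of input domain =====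

-- B replaces A's linear greedy skip-accumulator by a divide-and-conquer recursion on the
-- sorted list (alternative decomposition, same cost). A sorts its list argument in place;
-- the equivalence proved here is about the return value (B performs the same sort).

-- ===== PORT A =====
-- A's loop: current_sum += d; if current_sum > K: current_sum -= d; continue; max_arrows += 1
def maLoop (K : Int) (st : Int × Int) (l : List Int) : Int × Int :=
  l.foldl (fun st d =>
    let s := st.1 + d
    if s > K then (s - d, st.2) else (s, st.2 + 1)) st

def max_arrows (N : Int) (K : Int) (A : List Int) : Int :=
  (maLoop K (0, 0) (PySem.List.sorted A (fun x => x) false)).2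

-- ===== PORT B =====
-- Source B's run(lst, s): split at mid = len//2 (lst[:mid] with 0 ≤ mid ≤ len is exactly take,
-- lst[mid:] exactly drop), recurse on the left; only if the whole left half fits, recurse
-- on the right with offset s + sum(left). The extra fuel argument (always ≥ lst.length,
-- consumed once per level) only makes the same recursion structurally total.
def mbRun (K : Int) : Nat → List Int → Int → Int
  | 0, _, _ => 0
  | fuel + 1, lst, s =>
    if lst.length = 0 then 0
    else if lst.length = 1 then (if s + lst.headI ≤ K then 1 else 0)
    else
      let mid := lst.length / 2
      let left := lst.take mid
      let right := lst.drop mid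
      let r := mbRun K fuel left s
      if r < (mid : Int) then r else (mid : Int) + mbRun K fuel right (s + left.sum)

def max_arrows_alt (N : Int) (K : Int) (A : List Int) : Int :=
  let lst := PySem.List.sorted A (fun x => x) false
  mbRun K lst.length lst 0

-- ===== PRECONDITION & SPEC =====
def Spec_max_arrows (N : Int) (K : Int) (A : List Int) (out : Int) : Prop := out = max_arrows_alt N K A
instance (N : Int) (K : Int) (A : List Int) (out : Int) : Decidable (Spec_max_arrows N K A out) := by unfold Spec_max_arrows; infer_instance

-- ===== CLAIM (what is proved, stated in full; the proofs are below) =====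
def Claim_equal_max_arrows : Prop := ∀ (N : Int) (K : Int) (A : List Int), Dom_max_arrows N K A → Spec_max_arrows N K A (max_arrows N K A)

-- ===== LEMMAS AND PROOFS =====

-- reference function: length of the leading run of prefix sums (from offset s) staying ≤ K
def cntFrom (K s : Int) : List Int → Int
  | [] => 0
  | d :: t => if s + d ≤ K then 1 + cntFrom K (s + d) t else 0

theorem cntFrom_le_length (K s : Int) (l : List Int) : cntFrom K s l ≤ l.length := by
  induction l generalizing s with
  | nil => simp [cntFrom]
  | cons d t ih =>
    simp only [cntFrom, List.length_cons]
    split_ifs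
    · have := ih (s + d); push_cast; omega
    · push_cast; omega

-- the leading run composes across a split
theorem cntFrom_append (K s : Int) (l1 l2 : List Int) :
    cntFrom K s (l1 ++ l2)
      = if cntFrom K s l1 = l1.length then l1.length + cntFrom K (s + l1.sum) l2
        else cntFrom K s l1 := by
  induction l1 generalizing s with
  | nil => simp [cntFrom]
  | cons d t ih =>
    simp only [List.cons_append, cntFrom, List.length_cons, List.sum_cons]
    by_cases h : s + d ≤ K
    · rw [if_pos h, if_pos h, ih]
      have hle := cntFrom_le_length K (s + d) t
      by_cases he : cntFrom K (s + d) t = t.length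
      · rw [if_pos he, if_pos (by push_cast; omega)]
        rw [show s + (d + t.sum) = s + d + t.sum by ring]
        push_cast; omega
      · rw [if_neg he, if_neg (by push_cast; omega)]
    · rw [if_neg h, if_neg h, if_neg (by have := cntFrom_le_length K s (d :: t); simp [cntFrom, h] at *; omega)]

-- B's divide-and-conquer computes the leading run
theorem mbRun_eq_cntFrom (K : Int) (fuel : Nat) (lst : List Int) (s : Int)
    (hf : lst.length ≤ fuel) : mbRun K fuel lst s = cntFrom K s lst := by
  induction fuel generalizing lst s with
  | zero =>
    have : lst = [] := by
      cases lst with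
      | nil => rfl
      | cons a t => simp at hf
    subst this; simp [mbRun, cntFrom]
  | succ fuel ih =>
    rw [mbRun]
    by_cases h0 : lst.length = 0
    · rw [if_pos h0]
      rw [List.length_eq_zero_iff] at h0
      subst h0; simp [cntFrom]
    · rw [if_neg h0]
      by_cases h1 : lst.length = 1
      · rw [if_pos h1]
        match lst, h1 with
        | [d], _ => simp [cntFrom]
      · rw [if_neg h1]
        simp only
        set mid := lst.length / 2 with hmid
        have hml : mid < lst.length := by omega
        have hmp : 0 < mid := by omega
        have hleft : (lst.take mid).length = mid := by simp; omega
        have hright : (lst.drop mid).length = lst.length - mid := by simp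
        have ihl : mbRun K fuel (lst.take mid) s = cntFrom K s (lst.take mid) :=
          ih _ _ (by omega)
        have ihr : mbRun K fuel (lst.drop mid) (s + (lst.take mid).sum)
            = cntFrom K (s + (lst.take mid).sum) (lst.drop mid) :=
          ih _ _ (by omega)
        rw [ihl, ihr]
        conv_rhs => rw [← List.take_append_drop mid lst]
        rw [cntFrom_append, hleft]
        have hle := cntFrom_le_length K s (lst.take mid)
        rw [hleft] at hle
        by_cases hc : cntFrom K s (lst.take mid) = (mid : Int)
        · rw [if_neg (by omega), if_pos hc]
        · rw [if_pos (by omega), if_neg hc]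

-- once an element is skipped, the state never changes (all later sums also exceed K)
theorem maLoop_skip (K : Int) (l : List Int) (s m : Int)
    (h : ∀ d ∈ l, s + d > K) : maLoop K (s, m) l = (s, m) := by
  induction l with
  | nil => rfl
  | cons d t ih =>
    have hd : s + d > K := h d (by simp)
    simp only [maLoop, List.foldl_cons]
    have : (if s + d > K then (s + d - d, m) else (s + d, m + 1)) = (s, m) := by
      simp only [if_pos hd]
      congr 1
      omega
    rw [this]
    exact ih (fun x hx => h x (by simp [hx]))

theorem maLoop_cnt (K : Int) (l : List Int) (hs : l.Pairwise (· ≤ ·)) (s m : Int) :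
    (maLoop K (s, m) l).2 = m + cntFrom K s l := by
  induction l generalizing s m with
  | nil => simp [maLoop, cntFrom]
  | cons d t ih =>
    rcases List.pairwise_cons.mp hs with ⟨hhd, htl⟩
    by_cases h : s + d ≤ K
    · have : maLoop K (s, m) (d :: t) = maLoop K (s + d, m + 1) t := by
        simp [maLoop, show ¬ s + d > K by omega]
      rw [this, ih htl]
      simp [cntFrom, h]; omega
    · have hall : ∀ x ∈ t, s + x > K := fun x hx => by have := hhd x hx; omega
      have e : (s + d - d, m) = (s, m) := by congr 1; omega
      have : maLoop K (s, m) (d :: t) = maLoop K (s, m) t := by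
        simp only [maLoop, List.foldl_cons, if_pos (show s + d > K by omega), e]
      rw [this, maLoop_skip K t s m hall]
      simp [cntFrom, show ¬ s + d ≤ K from h]

-- ===== VERDICT (by name: the statement is the Claim_ definition above) =====
theorem max_arrows_spec : Claim_equal_max_arrows := by
  intro N K A _
  unfold Spec_max_arrows max_arrows max_arrows_alt
  rw [maLoop_cnt K _ (PySem.List.sorted_pairwise A (fun x => x)) 0 0,
      mbRun_eq_cntFrom K _ _ 0 le_rfl]
  simp
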